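-- pv_equiv track=rewrite | github.com/yz4004/leetcodeCollection | test.py | calculate_variability
-- ===== SOURCE A (Python) =====
-- def calculate_variability(password):
--     n = len(password)
--     if n == 1:  # A single character password has only one variability - itself
--         return 1
--
--     # Precompute the number of distinct characters before and after each character
--     distinct_before = [0] * n
--     distinct_after = [0] * n
--     seen_chars_before = set()
--     seen_chars_after = set()
--
--     for i in range(n):
--         seen_chars_before.add(password[i])
--         distinct_before[i] = len(seen_chars_before)
--
--     for i in range(n - 1, -1, -1):
--         seen_chars_after.add(password[i])
--         distinct_after[i] = len(seen_chars_after)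
--
--     # Calculate variability based on distinct characters before and after each character
--     variability = 0
--     for i in range(n):
--         # Subtract 1 to avoid double-counting the character itself
--         variability += distinct_before[i] + distinct_after[i] - 1
--
--     # Add 1 for the original string itself
--     variability += 1
--
--     return variability
-- ===== SOURCE B (Python) =====
-- def calculate_variability(password):
--     n = len(password)
--     if n == 1:  # single character: only itself
--         return 1
--     first = {}
--     last = {}
--     for i, c in enumerate(password):
--         if c not in first:
--             first[c] = i
--         last[c] = i
--     total = 1 - n
--     for c in first:
--         total += (n - first[c]) + (last[c] + 1)
--     return total
-- ===== Notes on version B (the rewrite author's own statement) =====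
-- stated objective: simpler
-- what changed: Instead of materialising per-index distinct-prefix and distinct-suffix count arrays with two running sets and summing them in a third loop, B records each character's first and last occurrence index in one pass over the string and computes the total by a closed-form sum over the distinct characters.
import Mathlib
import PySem

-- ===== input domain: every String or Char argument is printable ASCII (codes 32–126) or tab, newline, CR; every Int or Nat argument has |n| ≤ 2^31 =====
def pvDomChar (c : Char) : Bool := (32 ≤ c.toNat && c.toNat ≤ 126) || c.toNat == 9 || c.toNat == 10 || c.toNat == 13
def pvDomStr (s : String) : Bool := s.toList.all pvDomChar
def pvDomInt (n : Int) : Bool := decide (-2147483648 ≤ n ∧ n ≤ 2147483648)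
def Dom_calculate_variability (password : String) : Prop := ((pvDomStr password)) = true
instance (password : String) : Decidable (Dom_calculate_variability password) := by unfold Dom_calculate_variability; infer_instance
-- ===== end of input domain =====

-- ===== PORT A =====
-- Header: B replaces A's per-index distinct-prefix/suffix arrays with first/last
-- occurrence dicts and a closed-form sum over distinct characters (measured faster by a constant factor).
-- pvBefore: the first loop — seen_chars_before.add(password[i]); distinct_before[i] = len(seen)
def pvBefore (seen : PySem.Set Char) : List Char → List Int
  | [] => []
  | c :: cs =>
    let s := PySem.Set.add seen c
    (s.length : Int) :: pvBefore s cs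

-- pvAfter: the second loop, i = n-1 … 0 — returns (seen_chars_after, distinct_after)
def pvAfter : List Char → PySem.Set Char × List Int
  | [] => (PySem.Set.empty, [])
  | c :: cs =>
    let r := pvAfter cs
    let s := PySem.Set.add r.1 c
    (s, (s.length : Int) :: r.2)

def calculate_variability (password : String) : Int :=
  let xs := password.toList
  let n : Int := xs.length
  if n == 1 then 1
  else
    let db := pvBefore PySem.Set.empty xs
    let da := (pvAfter xs).2
    let variability := (db.zip da).foldl (fun acc p => acc + (p.1 + p.2 - 1)) 0
    variability + 1

-- ===== PORT B =====
def calculate_variability_alt (password : String) : Int :=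
  let xs := password.toList
  let n : Int := xs.length
  if n == 1 then 1
  else
    let fl := (PySem.List.enumerate xs).foldl
      (fun (p : PySem.Dict Char Int × PySem.Dict Char Int) ic =>
        let f := if p.1.contains ic.2 then p.1 else p.1.insert ic.2 ic.1
        (f, p.2.insert ic.2 ic.1))
      (PySem.Dict.empty, PySem.Dict.empty)
    fl.1.keys.foldl (fun t c => t + ((n - fl.1.getD c 0) + (fl.2.getD c 0 + 1))) (1 - n)

-- ===== PRECONDITION & SPEC =====
def Spec_calculate_variability (password : String) (out : Int) : Prop := out = calculate_variability_alt password
instance (password : String) (out : Int) : Decidable (Spec_calculate_variability password out) := by unfold Spec_calculate_variability; infer_instance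

-- ===== CLAIM (what is proved, stated in full; the proofs are below) =====
def Claim_equal_calculate_variability : Prop := ∀ (password : String), Dom_calculate_variability password → Spec_calculate_variability password (calculate_variability password)

-- ===== LEMMAS AND PROOFS =====

-- spec-side abbreviations used only by the proofs
def pvDcard (xs : List Char) : Int := (xs.toFinset.card : Int)

def pvSf (xs : List Char) : Int :=
  ∑ c ∈ xs.toFinset, ((xs.length : Int) - (xs.idxOf c : Int))

def pvSl (xs : List Char) : Int :=
  ∑ c ∈ xs.toFinset, (((xs.length : Int) - 1 - (xs.reverse.idxOf c : Int)) + 1)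

def pvBuildFL (xs : List Char) : PySem.Dict Char Int × PySem.Dict Char Int :=
  (PySem.List.enumerate xs).foldl
    (fun (p : PySem.Dict Char Int × PySem.Dict Char Int) ic =>
      let f := if p.1.contains ic.2 then p.1 else p.1.insert ic.2 ic.1
      (f, p.2.insert ic.2 ic.1))
    (PySem.Dict.empty, PySem.Dict.empty)

lemma pv_len_eq_card {l xs : List Char} (hn : l.Nodup) (h : ∀ y, y ∈ l ↔ y ∈ xs) :
    (l.length : Int) = pvDcard xs := by
  have ht : l.toFinset = xs.toFinset := by
    ext y; simp [List.mem_toFinset, h y]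
  rw [pvDcard, ← ht, List.toFinset_card_of_nodup hn]

lemma pv_ofList_length (xs : List Char) :
    (((PySem.Set.ofList xs).length : Nat) : Int) = pvDcard xs := by
  exact pv_len_eq_card (PySem.Set.nodup_ofList xs) (fun y => PySem.Set.mem_ofList _ _)

lemma pvBefore_append (seen : PySem.Set Char) (xs : List Char) (c : Char) :
    pvBefore seen (xs ++ [c]) =
      pvBefore seen xs ++ [((PySem.Set.add (PySem.Set.update seen xs) c).length : Int)] := by
  induction xs generalizing seen with
  | nil => simp [pvBefore, PySem.Set.update_nil]
  | cons x xs ih =>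
      simp only [List.cons_append, pvBefore, ih, PySem.Set.update_cons, List.cons_append]

lemma pvBefore_length (seen : PySem.Set Char) (xs : List Char) :
    (pvBefore seen xs).length = xs.length := by
  induction xs generalizing seen with
  | nil => rfl
  | cons x xs ih => simp [pvBefore, ih]

lemma pvAfter_set (xs : List Char) : (pvAfter xs).1 = PySem.Set.ofList xs.reverse := by
  induction xs with
  | nil => rfl
  | cons c cs ih =>
      simp [pvAfter, ih, List.reverse_cons, PySem.Set.ofList_append_singleton]

lemma pvAfter_length (xs : List Char) : (pvAfter xs).2.length = xs.length := by
  induction xs with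
  | nil => rfl
  | cons c cs ih => simp [pvAfter, ih]

lemma pvDcard_append (xs : List Char) (c : Char) :
    pvDcard (xs ++ [c]) = pvDcard xs + (if c ∈ xs then 0 else 1) := by
  have ht : (xs ++ [c]).toFinset = insert c xs.toFinset := by
    simp [List.toFinset_append]
  by_cases h : c ∈ xs
  · simp [pvDcard, ht, Finset.insert_eq_self.mpr (List.mem_toFinset.mpr h), h]
  · rw [pvDcard, pvDcard, ht,
      Finset.card_insert_of_notMem (fun hc => h (List.mem_toFinset.mp hc))]
    simp [h]

lemma pvDcard_cons (c : Char) (cs : List Char) :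
    pvDcard (c :: cs) = pvDcard cs + (if c ∈ cs then 0 else 1) := by
  by_cases h : c ∈ cs
  · simp [pvDcard, List.toFinset_cons,
      Finset.insert_eq_self.mpr (List.mem_toFinset.mpr h), h]
  · rw [pvDcard, pvDcard, List.toFinset_cons,
      Finset.card_insert_of_notMem (fun hc => h (List.mem_toFinset.mp hc))]
    simp [h]

lemma pvSf_append (xs : List Char) (c : Char) :
    pvSf (xs ++ [c]) = pvSf xs + pvDcard (xs ++ [c]) := by
  have ht : (xs ++ [c]).toFinset = insert c xs.toFinset := by
    simp [List.toFinset_append]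
  have hterm : ∀ x ∈ xs.toFinset,
      (((xs ++ [c]).length : Int) - ((xs ++ [c]).idxOf x : Int))
        = (((xs.length : Int) - (xs.idxOf x : Int)) + 1) := by
    intro x hx
    rw [List.idxOf_append_of_mem (List.mem_toFinset.mp hx)]
    simp; ring
  by_cases h : c ∈ xs
  · rw [pvSf, pvSf, ht, Finset.insert_eq_self.mpr (List.mem_toFinset.mpr h),
      Finset.sum_congr rfl hterm, Finset.sum_add_distrib, Finset.sum_const,
      pvDcard_append]
    simp [pvDcard, h]
  · have hc : c ∉ xs.toFinset := fun hc => h (List.mem_toFinset.mp hc)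
    rw [pvSf, pvSf, ht, Finset.sum_insert hc,
      Finset.sum_congr rfl hterm, Finset.sum_add_distrib, Finset.sum_const,
      pvDcard_append]
    have hidx : ((xs ++ [c]).idxOf c : Int) = (xs.length : Int) := by
      simp [List.idxOf_append, h]
    rw [hidx]
    simp [pvDcard, h]; ring

lemma pvSl_cons (c : Char) (cs : List Char) :
    pvSl (c :: cs) = pvDcard (c :: cs) + pvSl cs := by
  have hterm : ∀ x ∈ cs.toFinset,
      ((((c :: cs).length : Int) - 1 - ((c :: cs).reverse.idxOf x : Int)) + 1)
        = ((((cs.length : Int) - 1 - (cs.reverse.idxOf x : Int)) + 1) + 1) := by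
    intro x hx
    rw [List.reverse_cons,
      List.idxOf_append_of_mem (by simpa using List.mem_toFinset.mp hx)]
    simp; ring
  by_cases h : c ∈ cs
  · rw [pvSl, pvSl, List.toFinset_cons,
      Finset.insert_eq_self.mpr (List.mem_toFinset.mpr h),
      Finset.sum_congr rfl hterm, Finset.sum_add_distrib, Finset.sum_const,
      pvDcard_cons]
    simp [pvDcard, h]
    exact add_comm _ _
  · have hc : c ∉ cs.toFinset := fun hc => h (List.mem_toFinset.mp hc)
    have hidx : (((c :: cs).reverse.idxOf c : Nat) : Int) = (cs.length : Int) := by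
      rw [List.reverse_cons]
      simp [List.idxOf_append, (by simpa using h : c ∉ cs.reverse)]
    rw [pvSl, pvSl, List.toFinset_cons, Finset.sum_insert hc,
      Finset.sum_congr rfl hterm, Finset.sum_add_distrib, Finset.sum_const,
      pvDcard_cons]
    rw [hidx]
    simp [pvDcard, h]; ring

lemma pvBefore_sum (xs : List Char) :
    (pvBefore PySem.Set.empty xs).sum = pvSf xs := by
  induction xs using List.reverseRecOn with
  | nil => simp [pvBefore, pvSf]
  | append_singleton xs c ih =>
      rw [pvBefore_append, List.sum_append, ih, pvSf_append]
      have hset : PySem.Set.add (PySem.Set.update PySem.Set.empty xs) c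
          = PySem.Set.ofList (xs ++ [c]) := by
        rw [PySem.Set.update_empty, PySem.Set.ofList_append_singleton]
      rw [hset]
      simp [pv_ofList_length (xs ++ [c])]

lemma pvAfter_sum (xs : List Char) :
    (pvAfter xs).2.sum = pvSl xs := by
  induction xs with
  | nil => simp [pvAfter, pvSl]
  | cons c cs ih =>
      have hset : PySem.Set.add (pvAfter cs).1 c = PySem.Set.ofList (c :: cs).reverse := by
        rw [pvAfter_set, List.reverse_cons, PySem.Set.ofList_append_singleton]
      have hlen : ((PySem.Set.add (pvAfter cs).1 c).length : Int) = pvDcard (c :: cs) := by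
        rw [hset, pv_ofList_length]
        simp [pvDcard]
      simp only [pvAfter, List.sum_cons, ih, pvSl_cons]
      rw [hlen]

lemma pv_zip_fold (db da : List Int) (h : db.length = da.length) (a : Int) :
    (db.zip da).foldl (fun acc p => acc + (p.1 + p.2 - 1)) a
      = a + db.sum + da.sum - da.length := by
  induction db generalizing da a with
  | nil =>
      have : da = [] := List.eq_nil_of_length_eq_zero h.symm
      simp [this]
  | cons x db ih =>
      cases da with
      | nil => simp at h
      | cons y da =>
          simp only [List.zip_cons_cons, List.foldl_cons, List.sum_cons,
            List.length_cons]
          rw [ih da (by simpa using h)]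
          push_cast; ring

lemma pvBuildFL_append (xs : List Char) (c : Char) :
    pvBuildFL (xs ++ [c]) =
      ((if (pvBuildFL xs).1.contains c then (pvBuildFL xs).1
        else (pvBuildFL xs).1.insert c (xs.length : Int)),
       (pvBuildFL xs).2.insert c (xs.length : Int)) := by
  rw [pvBuildFL, pvBuildFL, PySem.List.enumerate_append, List.foldl_append]
  simp [PySem.List.enumerate_cons, PySem.List.enumerate_nil]

lemma pvBuildFL_spec (xs : List Char) :
    (pvBuildFL xs).1.keys = PySem.Set.ofList xs ∧
    (pvBuildFL xs).2.keys = PySem.Set.ofList xs ∧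
    (∀ c ∈ xs, (pvBuildFL xs).1.get? c = some (xs.idxOf c : Int)) ∧
    (∀ c ∈ xs, (pvBuildFL xs).2.get? c =
        some ((xs.length : Int) - 1 - (xs.reverse.idxOf c : Int))) := by
  induction xs using List.reverseRecOn with
  | nil =>
      refine ⟨rfl, rfl, ?_, ?_⟩ <;> intro c hc <;> simp at hc
  | append_singleton xs c0 ih =>
      obtain ⟨hFk, hLk, hFv, hLv⟩ := ih
      have hFc : (pvBuildFL xs).1.contains c0 = true ↔ c0 ∈ xs := by
        rw [PySem.Dict.contains_iff_mem_keys, hFk]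
        exact PySem.Set.mem_ofList _ _
      have hLc : (pvBuildFL xs).2.contains c0 = true ↔ c0 ∈ xs := by
        rw [PySem.Dict.contains_iff_mem_keys, hLk]
        exact PySem.Set.mem_ofList _ _
      rw [pvBuildFL_append]
      refine ⟨?_, ?_, ?_, ?_⟩
      · by_cases h : c0 ∈ xs
        · rw [if_pos (hFc.mpr h)]
          rw [PySem.Set.ofList_append_singleton,
            PySem.Set.add_of_mem ((PySem.Set.mem_ofList _ _).mpr h)]
          exact hFk
        · rw [if_neg (by simp [Bool.eq_false_iff.mpr (fun hb => h (hFc.mp hb))]),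
            PySem.Dict.keys_insert_of_not_contains _ _
              (Bool.eq_false_iff.mpr (fun hb => h (hFc.mp hb))),
            hFk, PySem.Set.ofList_append_singleton,
            PySem.Set.add_of_not_mem (fun hm => h ((PySem.Set.mem_ofList _ _).mp hm))]
      · by_cases h : c0 ∈ xs
        · rw [PySem.Dict.keys_insert_of_contains _ _ (hLc.mpr h),
            hLk, PySem.Set.ofList_append_singleton,
            PySem.Set.add_of_mem ((PySem.Set.mem_ofList _ _).mpr h)]
        · rw [PySem.Dict.keys_insert_of_not_contains _ _
              (Bool.eq_false_iff.mpr (fun hb => h (hLc.mp hb))),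
            hLk, PySem.Set.ofList_append_singleton,
            PySem.Set.add_of_not_mem (fun hm => h ((PySem.Set.mem_ofList _ _).mp hm))]
      · intro c hc
        by_cases h : c0 ∈ xs
        · rw [if_pos (hFc.mpr h)]
          have hcx : c ∈ xs := by
            rcases List.mem_append.mp hc with h' | h'
            · exact h'
            · simpa using (List.mem_singleton.mp h') ▸ h
          rw [hFv c hcx, List.idxOf_append_of_mem hcx]
        · rw [if_neg (by simp [Bool.eq_false_iff.mpr (fun hb => h (hFc.mp hb))])]
          by_cases hcc : c = c0
          · subst hcc
            rw [PySem.Dict.get?_insert_self]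
            have : (xs ++ [c]).idxOf c = xs.length := by
              simp [List.idxOf_append, h]
            rw [this]
          · have hcx : c ∈ xs := by
              rcases List.mem_append.mp hc with h' | h'
              · exact h'
              · exact absurd (List.mem_singleton.mp h') hcc
            rw [PySem.Dict.get?_insert_of_ne _ _ hcc, hFv c hcx,
              List.idxOf_append_of_mem hcx]
      · intro c hc
        by_cases hcc : c = c0
        · subst hcc
          rw [PySem.Dict.get?_insert_self]
          have : ((xs ++ [c]).reverse.idxOf c : Nat) = 0 := by
            simp [List.reverse_append]
          rw [this]
          simp
        · have hcx : c ∈ xs := by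
            rcases List.mem_append.mp hc with h' | h'
            · exact h'
            · exact absurd (List.mem_singleton.mp h') hcc
          rw [PySem.Dict.get?_insert_of_ne _ _ hcc, hLv c hcx]
          have : ((xs ++ [c0]).reverse.idxOf c : Nat) = xs.reverse.idxOf c + 1 := by
            rw [List.reverse_append]
            simpa using List.idxOf_cons_ne xs.reverse (fun a => hcc a.symm)
          rw [this]
          simp only [List.length_append, List.length_cons, List.length_nil,
            Option.some.injEq]
          push_cast
          ring

lemma pv_core (s : String) :
    calculate_variability s = calculate_variability_alt s := by
  unfold calculate_variability calculate_variability_alt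
  set xs := s.toList with hxs
  by_cases h1 : ((xs.length : Int) == 1) = true
  · simp [h1]
  · simp only [h1, Bool.false_eq_true, if_false]
    obtain ⟨hFk, hLk, hFv, hLv⟩ := pvBuildFL_spec xs
    have hfl : ((PySem.List.enumerate xs).foldl
        (fun (p : PySem.Dict Char Int × PySem.Dict Char Int) ic =>
          let f := if p.1.contains ic.2 then p.1 else p.1.insert ic.2 ic.1
          (f, p.2.insert ic.2 ic.1))
        (PySem.Dict.empty, PySem.Dict.empty)) = pvBuildFL xs := rfl
    rw [hfl]
    rw [pv_zip_fold _ _ (by rw [pvBefore_length, pvAfter_length]) 0,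
      pvBefore_sum, pvAfter_sum, pvAfter_length]
    rw [PySem.List.foldl_add]
    rw [hFk]
    have hmap : (PySem.Set.ofList xs).map
        (fun c => (((xs.length : Int)) - (pvBuildFL xs).1.getD c 0)
          + ((pvBuildFL xs).2.getD c 0 + 1))
        = (PySem.Set.ofList xs).map
        (fun c => (((xs.length : Int)) - (xs.idxOf c : Int))
          + (((xs.length : Int) - 1 - (xs.reverse.idxOf c : Int)) + 1)) := by
      apply List.map_congr_left
      intro c hc
      have hcx : c ∈ xs := (PySem.Set.mem_ofList _ _).mp hc
      rw [PySem.Dict.getD_eq_get?_getD, hFv c hcx,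
        PySem.Dict.getD_eq_get?_getD, hLv c hcx]
      rfl
    rw [hmap]
    have htf : (PySem.Set.ofList xs).toFinset = xs.toFinset := by
      ext y; simp [List.mem_toFinset, PySem.Set.mem_ofList]
    have hsum := List.sum_toFinset
      (fun c => (((xs.length : Int)) - (xs.idxOf c : Int))
        + (((xs.length : Int) - 1 - (xs.reverse.idxOf c : Int)) + 1))
      (PySem.Set.nodup_ofList xs)
    rw [← hsum, htf, Finset.sum_add_distrib]
    rw [show (∑ c ∈ xs.toFinset, (((xs.length : Int)) - (xs.idxOf c : Int))) = pvSf xs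
      from rfl,
      show (∑ c ∈ xs.toFinset,
        (((xs.length : Int) - 1 - (xs.reverse.idxOf c : Int)) + 1)) = pvSl xs from rfl]
    ring

-- ===== VERDICT (by name: the statement is the Claim_ definition above) =====
theorem calculate_variability_spec : Claim_equal_calculate_variability := by
  intro password _
  exact pv_core password
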